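-- pv_equiv track=rewrite | github.com/ChessZra/LC | 4044-maximum-bitwise-xor-after-rearrangement/maximum-bitwise-xor-after-rearrangement.py | maximumXor
-- ===== SOURCE A (Python) =====
-- def maximumXor(s: str, t: str) -> str:
--     N = len(s)
--     ones = t.count('1')
--     zeroes = N - ones
--     res = ''
--     for i in range(N):
--         if s[i] == '1':
--             if zeroes:
--                 res += '1'
--                 zeroes -= 1
--             elif ones:
--                 res += '0'
--                 ones -= 1
--         else:
--             if ones:
--                 res += '1'
--                 ones -= 1
--             else:
--                 res += '0'
--                 zeroes -= 1
--     return res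
-- ===== SOURCE B (Python) =====
-- def maximumXor(s: str, t: str) -> str:
--     n = len(s)
--     ones = t.count('1')
--     zeroes = n - ones
--     ones_pos = [i for i, c in enumerate(s) if c == '1']
--     zeros_pos = [i for i, c in enumerate(s) if c != '1']
--     res = ['0'] * n
--     for j in ones_pos[:max(zeroes, 0)]:
--         res[j] = '1'
--     for j in zeros_pos[:ones]:
--         res[j] = '1'
--     return ''.join(res)
-- ===== Notes on version B (the rewrite author's own statement) =====
-- stated objective: alternative
-- what changed: A builds the answer left-to-right with two coupled countdown budgets and an if/elif chain; B instead collects the '1'-positions and '0'-positions of s, starts from an all-'0' list and marks '1' on the first zero-budget-many '1'-positions and the first one-budget-many '0'-positions.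
-- intended difference: On inputs where t contains more '1' characters than len(s) (possible only when the strings violate the problem's equal-length contract) and s contains a '1', A's zeroes counter goes negative and, being truthy, makes A return all '1's; B clamps the exhausted zero-budget at 0 and returns '0' at the '1'-positions it cannot serve, which is the intended greedy behaviour. — e.g. on maximumXor("1", "11"): A returns "1", B returns "0"
import Mathlib
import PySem

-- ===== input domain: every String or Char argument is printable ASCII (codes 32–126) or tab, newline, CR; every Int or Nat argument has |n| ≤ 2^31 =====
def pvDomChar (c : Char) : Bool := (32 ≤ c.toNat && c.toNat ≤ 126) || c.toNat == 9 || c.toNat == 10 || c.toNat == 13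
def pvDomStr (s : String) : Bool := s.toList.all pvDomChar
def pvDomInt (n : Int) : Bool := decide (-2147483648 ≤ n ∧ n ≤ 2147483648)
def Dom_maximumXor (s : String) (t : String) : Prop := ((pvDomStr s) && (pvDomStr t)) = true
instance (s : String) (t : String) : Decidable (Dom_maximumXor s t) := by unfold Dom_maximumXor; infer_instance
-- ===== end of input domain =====

-- B replaces A's coupled countdown greedy by a positional construction: collect the
-- '1'-positions and '0'-positions of s, start from an all-'0' answer and set '1' on the
-- first (zero-budget) many '1'-positions and the first (one-budget) many '0'-positions.
-- Objective: alternative decomposition (same O(n) cost), no speed claim.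

-- ===== PORT A =====
-- one iteration of A's "for i in range(N)" body (state = (ones, zeroes, res))
def maximumXorStep (st : Int × Int × List Char) (c : Char) : Int × Int × List Char :=
  if c == '1' then
    if st.2.1 ≠ 0 then (st.1, st.2.1 - 1, st.2.2 ++ ['1'])
    else if st.1 ≠ 0 then (st.1 - 1, st.2.1, st.2.2 ++ ['0'])
    else (st.1, st.2.1, st.2.2)
  else
    if st.1 ≠ 0 then (st.1 - 1, st.2.1, st.2.2 ++ ['1'])
    else (st.1, st.2.1 - 1, st.2.2 ++ ['0'])

def maximumXor (s : String) (t : String) : String :=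
  let N : Int := (s.toList.length : Int)
  let ones : Int := (PySem.Str.count t "1" : Int)
  let zeroes : Int := N - ones
  String.ofList (s.toList.foldl maximumXorStep (ones, zeroes, ([] : List Char))).2.2

-- ===== PORT B =====
def maximumXor_alt (s : String) (t : String) : String :=
  let n := s.toList.length
  let ones : Int := (PySem.Str.count t "1" : Int)
  let zeroes : Int := (n : Int) - ones
  let onesPos := ((PySem.List.enumerate s.toList 0).filter (fun p => p.2 == '1')).map (·.1)
  let zerosPos := ((PySem.List.enumerate s.toList 0).filter (fun p => p.2 != '1')).map (·.1)
  let res0 := List.replicate n '0'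
  let res1 := (PySem.List.slice onesPos (some 0) (some (max zeroes 0))).foldl
      (fun r j => PySem.List.pySetD r j '1') res0
  let res2 := (PySem.List.slice zerosPos (some 0) (some ones)).foldl
      (fun r j => PySem.List.pySetD r j '1') res1
  String.ofList res2

-- ===== PRECONDITION & SPEC =====
-- When t contains more '1' characters than len(s) (only possible when the strings break the
-- problem's equal-length contract) and s contains a '1', A's zero-budget goes negative and,
-- being truthy, keeps placing '1' everywhere (all-'1's); B clamps the exhausted zero-budget
-- at zero and puts '0' at the '1'-positions it cannot serve, the intended greedy reading.
def D_maximumXor (s : String) (t : String) : Prop :=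
  s.toList.length < t.toList.count '1' ∧ '1' ∈ s.toList
instance (s : String) (t : String) : Decidable (D_maximumXor s t) := by
  unfold D_maximumXor; infer_instance

def Spec_maximumXor (s : String) (t : String) (out : String) : Prop :=
  ¬ D_maximumXor s t → out = maximumXor_alt s t
instance (s : String) (t : String) (out : String) : Decidable (Spec_maximumXor s t out) := by
  unfold Spec_maximumXor; infer_instance

def pvDiffWitness_maximumXor : String × String := ("1", "11")
def pvDiffWitnessOut_maximumXor : String × String := ("1", "0")

-- ===== CLAIM (what is proved, stated in full; the proofs are below) =====
def Claim_unchanged_maximumXor : Prop := ∀ (s : String) (t : String), Dom_maximumXor s t → Spec_maximumXor s t (maximumXor s t)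
def Claim_changed_maximumXor : Prop := Dom_maximumXor (pvDiffWitness_maximumXor.1) (pvDiffWitness_maximumXor.2) ∧ D_maximumXor (pvDiffWitness_maximumXor.1) (pvDiffWitness_maximumXor.2) ∧ maximumXor (pvDiffWitness_maximumXor.1) (pvDiffWitness_maximumXor.2) = pvDiffWitnessOut_maximumXor.1 ∧ maximumXor_alt (pvDiffWitness_maximumXor.1) (pvDiffWitness_maximumXor.2) = pvDiffWitnessOut_maximumXor.2 ∧ pvDiffWitnessOut_maximumXor.1 ≠ pvDiffWitnessOut_maximumXor.2
def Claim_exact_maximumXor : Prop := ∀ (s : String) (t : String), Dom_maximumXor s t → D_maximumXor s t → maximumXor s t ≠ maximumXor_alt s t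

-- ===== LEMMAS AND PROOFS =====

-- str.count with the one-character needle "1" counts the '1' characters
theorem count_one_go (fuel : Nat) : ∀ (l : List Char) (acc : Nat), l.length ≤ fuel →
    PySem.Chars.count.go ['1'] fuel l acc = acc + l.count '1' := by
  induction fuel with
  | zero =>
    intro l acc h
    have hnil : l = [] := List.eq_nil_of_length_eq_zero (by omega)
    subst hnil
    rw [PySem.Chars.count.go]; simp
  | succ f ih =>
    intro l acc h
    cases l with
    | nil => rw [PySem.Chars.count.go]; simp; omega
    | cons c t =>
      rw [PySem.Chars.count.go]
      by_cases hc : c = '1'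
      · simp [hc, List.isPrefixOf, ih t (acc + 1) (by simpa using h)]
        omega
      · have hnp : ¬ (['1'].isPrefixOf (c :: t) = true) := by
          simp [List.isPrefixOf]; exact fun hh => hc hh.symm
        simp [hnp, ih t acc (by simpa using h), hc]

theorem count_one (t : String) : (PySem.Str.count t "1") = t.toList.count '1' := by
  have h := count_one_go t.toList.length t.toList 0 le_rfl
  simp [pysem, PySem.Chars.count] at h ⊢
  exact h

-- the common specification both programs are reduced to: at a '1'-position output '1'
-- while the zero-budget Z lasts, at a '0'-position output '1' while the one-budget O lasts
def gSpec : List Char → Int → Int → List Char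
  | [], _, _ => []
  | c :: r, Z, O =>
    if c == '1' then (if 0 < Z then '1' else '0') :: gSpec r (Z - 1) O
    else (if 0 < O then '1' else '0') :: gSpec r Z (O - 1)

theorem gSpec_length (cs : List Char) (Z O : Int) : (gSpec cs Z O).length = cs.length := by
  induction cs generalizing Z O with
  | nil => rfl
  | cons c r ih => by_cases h : c = '1' <;> simp [gSpec, h, ih]

theorem gSpec_all01 (cs : List Char) (Z O : Int) (hZ : Z ≤ 0) (hO : (cs.length : Int) ≤ O) :
    gSpec cs Z O = cs.map (fun c => if c == '1' then '0' else '1') := by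
  induction cs generalizing Z O with
  | nil => rfl
  | cons c r ih =>
    simp only [List.length_cons, Nat.cast_add, Nat.cast_one] at hO
    by_cases h : c = '1'
    · simp [gSpec, h, ih (Z - 1) O (by omega) (by omega), show ¬ (0 : Int) < Z by omega]
    · simp [gSpec, h, ih Z (O - 1) hZ (by omega), show (0 : Int) < O by omega]

theorem gSpec_all10 (cs : List Char) (Z O : Int) (hO : O ≤ 0) (hZ : (cs.length : Int) ≤ Z) :
    gSpec cs Z O = cs.map (fun c => if c == '1' then '1' else '0') := by
  induction cs generalizing Z O with
  | nil => rfl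
  | cons c r ih =>
    simp only [List.length_cons, Nat.cast_add, Nat.cast_one] at hZ
    by_cases h : c = '1'
    · simp [gSpec, h, ih (Z - 1) O hO (by omega), show (0 : Int) < Z by omega]
    · simp [gSpec, h, ih Z (O - 1) (by omega) (by omega), show ¬ (0 : Int) < O by omega]

theorem gSpec_no1 (cs : List Char) (Z O : Int) (h : '1' ∉ cs) (hO : (cs.length : Int) ≤ O) :
    gSpec cs Z O = List.replicate cs.length '1' := by
  induction cs generalizing Z O with
  | nil => rfl
  | cons c r ih =>
    simp only [List.mem_cons, not_or] at h
    simp only [List.length_cons, Nat.cast_add, Nat.cast_one] at hO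
    have hc : ¬ c = '1' := fun hc => h.1 hc.symm
    simp [gSpec, hc, ih Z (O - 1) h.2 (by omega), show (0 : Int) < O by omega,
      List.replicate_succ]

theorem foldA_clean (cs : List Char) (O Z : Int) (acc : List Char)
    (hO : 0 ≤ O) (hZ : 0 ≤ Z) (hsum : O + Z = cs.length) :
    (cs.foldl maximumXorStep (O, Z, acc)).2.2 = acc ++ gSpec cs Z O := by
  induction cs generalizing O Z acc with
  | nil => simp [gSpec]
  | cons c r ih =>
    simp only [List.length_cons, Nat.cast_add, Nat.cast_one] at hsum
    by_cases hc : c = '1'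
    · by_cases hZ0 : Z = 0
      · -- zeroes exhausted: A consumes a one and appends '0'
        have hO0 : O ≠ 0 := by omega
        rw [List.foldl_cons, show maximumXorStep (O, Z, acc) c =
            (O - 1, Z, acc ++ ['0']) by simp [maximumXorStep, hc, hZ0, hO0]]
        rw [ih (O - 1) Z (acc ++ ['0']) (by omega) hZ (by omega)]
        have h1 : gSpec r 0 (O - 1) = gSpec r (-1) O := by
          rw [gSpec_all01 r 0 (O - 1) (by omega) (by omega),
            gSpec_all01 r (-1) O (by omega) (by omega)]
        simp [gSpec, hc, hZ0, h1]
      · rw [List.foldl_cons, show maximumXorStep (O, Z, acc) c =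
            (O, Z - 1, acc ++ ['1']) by simp [maximumXorStep, hc, hZ0]]
        rw [ih O (Z - 1) (acc ++ ['1']) hO (by omega) (by omega)]
        simp [gSpec, hc, show (0 : Int) < Z by omega]
    · by_cases hO0 : O = 0
      · -- ones exhausted: A consumes a zero and appends '0'
        have hZ0 : Z ≠ 0 := by omega
        rw [List.foldl_cons, show maximumXorStep (O, Z, acc) c =
            (O, Z - 1, acc ++ ['0']) by simp [maximumXorStep, hc, hO0]]
        rw [ih O (Z - 1) (acc ++ ['0']) hO (by omega) (by omega)]
        have h1 : gSpec r (Z - 1) 0 = gSpec r Z (-1) := by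
          rw [gSpec_all10 r (Z - 1) 0 (by omega) (by omega),
            gSpec_all10 r Z (-1) (by omega) (by omega)]
        simp [gSpec, hc, hO0, h1]
      · rw [List.foldl_cons, show maximumXorStep (O, Z, acc) c =
            (O - 1, Z, acc ++ ['1']) by simp [maximumXorStep, hc, hO0]]
        rw [ih (O - 1) Z (acc ++ ['1']) (by omega) hZ (by omega)]
        simp [gSpec, hc, show (0 : Int) < O by omega]

theorem foldA_dirty (cs : List Char) (O Z : Int) (acc : List Char)
    (hZ : Z < 0) (hO : (cs.length : Int) < O) :
    (cs.foldl maximumXorStep (O, Z, acc)).2.2 = acc ++ List.replicate cs.length '1' := by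
  induction cs generalizing O Z acc with
  | nil => simp
  | cons c r ih =>
    simp only [List.length_cons, Nat.cast_add, Nat.cast_one] at hO
    by_cases hc : c = '1'
    · rw [List.foldl_cons, show maximumXorStep (O, Z, acc) c =
          (O, Z - 1, acc ++ ['1']) by simp [maximumXorStep, hc, show Z ≠ 0 by omega]]
      rw [ih O (Z - 1) (acc ++ ['1']) (by omega) (by omega)]
      simp [List.replicate_succ]
    · rw [List.foldl_cons, show maximumXorStep (O, Z, acc) c =
          (O - 1, Z, acc ++ ['1']) by simp [maximumXorStep, hc, show O ≠ 0 by omega]]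
      rw [ih (O - 1) Z (acc ++ ['1']) hZ (by omega)]
      simp [List.replicate_succ]

-- positions of the characters satisfying p, in order (what B's comprehensions compute)
def posList (p : Char → Bool) (cs : List Char) : List Int :=
  ((PySem.List.enumerate cs 0).filter (fun q => p q.2)).map (·.1)

theorem enumerate_shift {α : Type} (xs : List α) (s : Int) :
    PySem.List.enumerate xs (s + 1) =
      (PySem.List.enumerate xs s).map (fun q => (q.1 + 1, q.2)) := by
  induction xs generalizing s with
  | nil => simp [PySem.List.enumerate_nil]
  | cons x xs ih => simp [PySem.List.enumerate_cons, ih (s + 1)]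

theorem posList_cons (p : Char → Bool) (c : Char) (cs : List Char) :
    posList p (c :: cs) = (if p c then [(0 : Int)] else []) ++ (posList p cs).map (· + 1) := by
  unfold posList
  rw [PySem.List.enumerate_cons, show (0 : Int) + 1 = 0 + 1 from rfl, enumerate_shift cs 0]
  by_cases hp : p c <;>
    simp [hp, List.filter_map, List.map_map, Function.comp_def]

theorem posList_nonneg (p : Char → Bool) (cs : List Char) :
    ∀ x ∈ posList p cs, 0 ≤ x := by
  intro x hx
  unfold posList at hx
  simp only [List.mem_map, List.mem_filter] at hx
  obtain ⟨q, ⟨hq, -⟩, rfl⟩ := hx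
  rw [PySem.List.mem_enumerate_iff] at hq
  obtain ⟨j, hj, rfl⟩ := hq
  simp

theorem mem_take_posList (p : Char → Bool) (cs : List Char) (k : Nat) (i : Nat) :
    ((i : Int) ∈ (posList p cs).take k) ↔
      ∃ h : i < cs.length, p cs[i] ∧ (cs.take i).countP p < k := by
  induction cs generalizing k i with
  | nil => simp [posList, PySem.List.enumerate_nil]
  | cons c r ih =>
    rw [posList_cons]
    by_cases hp : p c
    · simp only [hp, if_pos]
      cases k with
      | zero => simp
      | succ k' =>
        rw [List.cons_append, List.nil_append, List.take_succ_cons, ← List.map_take]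
        cases i with
        | zero => simp [hp]
        | succ i' =>
          have hne : ((i' + 1 : Nat) : Int) ≠ 0 := by push_cast; omega
          have hmm : ((i' + 1 : Nat) : Int) ∈ (((posList p r).take k').map (· + 1)) ↔
              ((i' : Nat) : Int) ∈ (posList p r).take k' := by
            simp only [List.mem_map]
            constructor
            · rintro ⟨y, hy, hxy⟩
              have : y = (i' : Int) := by push_cast at hxy; omega
              exact this ▸ hy
            · intro hy; exact ⟨(i' : Int), hy, by push_cast; ring⟩
          simp only [List.mem_cons, hne, false_or, hmm, ih k' i']
          constructor
            <;> rintro ⟨h, h1, h2⟩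
            <;> exact ⟨by simp only [List.length_cons] at h ⊢; omega, by simpa using h1, by
              simp [List.take_succ_cons, hp] at h2 ⊢; omega⟩
    · simp only [hp, if_neg, Bool.not_eq_true, List.nil_append]
      rw [← List.map_take]
      cases i with
      | zero =>
        simp only [List.mem_map]
        constructor
        · rintro ⟨y, hy, hxy⟩
          have h0 : (0 : Int) ≤ y := posList_nonneg p r y (List.mem_of_mem_take hy)
          omega
        · rintro ⟨h, h1, -⟩
          simp_all
      | succ i' =>
        have hmm : ((i' + 1 : Nat) : Int) ∈ (((posList p r).take k).map (· + 1)) ↔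
            ((i' : Nat) : Int) ∈ (posList p r).take k := by
          simp only [List.mem_map]
          constructor
          · rintro ⟨y, hy, hxy⟩
            have : y = (i' : Int) := by push_cast at hxy; omega
            exact this ▸ hy
          · intro hy; exact ⟨(i' : Int), hy, by push_cast; ring⟩
        rw [hmm, ih k i']
        constructor
          <;> rintro ⟨h, h1, h2⟩
          <;> exact ⟨by simp only [List.length_cons] at h ⊢; omega, by simpa using h1, by
            simp [List.take_succ_cons, hp] at h2 ⊢; omega⟩

theorem foldSet_length (idxs : List Int) (r : List Char) :
    (idxs.foldl (fun r j => PySem.List.pySetD r j '1') r).length = r.length := by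
  induction idxs generalizing r with
  | nil => rfl
  | cons j js ih => simp [List.foldl_cons, ih, PySem.List.length_pySetD]

theorem foldSet_getElem (idxs : List Int) (hnn : ∀ j ∈ idxs, 0 ≤ j) (r : List Char)
    (i : Nat) :
    (idxs.foldl (fun r j => PySem.List.pySetD r j '1') r)[i]? =
      if (i : Int) ∈ idxs ∧ i < r.length then some '1' else r[i]? := by
  induction idxs generalizing r with
  | nil => simp
  | cons j js ih =>
    have hj : 0 ≤ j := hnn j (List.mem_cons_self)
    have hjs : ∀ x ∈ js, 0 ≤ x := fun x hx => hnn x (List.mem_cons_of_mem _ hx)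
    rw [List.foldl_cons, ih hjs, PySem.List.pySetD_of_nonneg _ _ hj]
    by_cases hlt : i < r.length
    · by_cases hmem : (i : Int) ∈ js
      · simp [hmem, hlt]
      · by_cases hji : j = (i : Int)
        · have hti : j.toNat = i := by omega
          rw [hti, List.getElem?_set_self hlt]
          simp [hji, hlt]
        · have hti : j.toNat ≠ i := by omega
          rw [List.getElem?_set_ne hti]
          have : ¬ ((i : Int) = j) := fun hh => hji hh.symm
          simp [hmem, hlt, this]
    · simp only [List.length_set, hlt, and_false, if_false]
      rw [List.getElem?_eq_none (by simpa using not_lt.mp hlt),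
        List.getElem?_eq_none (not_lt.mp hlt)]

theorem gSpec_getElem (cs : List Char) (Z O : Int) (i : Nat) (h : i < cs.length)
    (h' : i < (gSpec cs Z O).length) :
    (gSpec cs Z O)[i] =
      if cs[i] == '1' then
        (if ((cs.take i).countP (fun c => c == '1') : Int) < Z then '1' else '0')
      else
        (if ((cs.take i).countP (fun c => c != '1') : Int) < O then '1' else '0') := by
  induction cs generalizing Z O i with
  | nil => simp at h
  | cons c r ih =>
    by_cases hc : c = '1'
    · cases i with
      | zero => simp [gSpec, hc]
      | succ i' =>
        have hlt : i' < r.length := by simpa using h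
        have hlt' : i' < (gSpec r (Z - 1) O).length := by rw [gSpec_length]; exact hlt
        have hg : (gSpec (c :: r) Z O)[i' + 1] = (gSpec r (Z - 1) O)[i'] := by
          simp [gSpec, hc]
        rw [hg, ih (Z - 1) O i' hlt hlt']
        simp only [List.getElem_cons_succ, List.take_succ_cons, List.countP_cons, hc]
        by_cases hr : r[i'] == '1'
        · simp only [hr, if_pos]
          exact if_congr (by push_cast; simp; omega) rfl rfl
        · simp only [hr, Bool.false_eq_true, if_false]
          exact if_congr (by push_cast; simp) rfl rfl
    · cases i with
      | zero => simp [gSpec, hc]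
      | succ i' =>
        have hlt : i' < r.length := by simpa using h
        have hlt' : i' < (gSpec r Z (O - 1)).length := by rw [gSpec_length]; exact hlt
        have hg : (gSpec (c :: r) Z O)[i' + 1] = (gSpec r Z (O - 1))[i'] := by
          simp [gSpec, hc]
        rw [hg, ih Z (O - 1) i' hlt hlt']
        simp only [List.getElem_cons_succ, List.take_succ_cons, List.countP_cons]
        by_cases hr : r[i'] == '1'
        · simp only [hr, if_pos]
          exact if_congr (by push_cast; simp [hc]) rfl rfl
        · simp only [hr, Bool.false_eq_true, if_false]
          exact if_congr (by push_cast; simp [hc]; omega) rfl rfl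

theorem core_eq (cs : List Char) (O : Nat) :
    ((PySem.List.slice (posList (fun c => c != '1') cs) (some 0) (some ((O : Nat) : Int))).foldl
        (fun r j => PySem.List.pySetD r j '1')
      ((PySem.List.slice (posList (fun c => c == '1') cs) (some 0)
          (some (max ((cs.length : Int) - O) 0))).foldl
        (fun r j => PySem.List.pySetD r j '1') (List.replicate cs.length '0')))
    = gSpec cs ((cs.length : Int) - O) O := by
  have hs1 : PySem.List.slice (posList (fun c => c == '1') cs) (some 0)
      (some (max ((cs.length : Int) - O) 0)) =
      (posList (fun c => c == '1') cs).take (max ((cs.length : Int) - O) 0).toNat := by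
    rw [PySem.List.slice_zero_start, PySem.List.slice_to _ (le_max_right _ _)]
  have hs2 : PySem.List.slice (posList (fun c => c != '1') cs) (some 0)
      (some ((O : Nat) : Int)) =
      (posList (fun c => c != '1') cs).take O := by
    rw [PySem.List.slice_zero_start, PySem.List.slice_to _ (by positivity), Int.toNat_natCast]
  rw [hs1, hs2]
  have hnn1 : ∀ j ∈ (posList (fun c => c == '1') cs).take
      (max ((cs.length : Int) - O) 0).toNat, 0 ≤ j :=
    fun j hj => posList_nonneg _ _ j (List.mem_of_mem_take hj)
  have hnn2 : ∀ j ∈ (posList (fun c => c != '1') cs).take O, 0 ≤ j :=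
    fun j hj => posList_nonneg _ _ j (List.mem_of_mem_take hj)
  have hlen1 : (((posList (fun c => c == '1') cs).take
        (max ((cs.length : Int) - O) 0).toNat).foldl
        (fun r j => PySem.List.pySetD r j '1') (List.replicate cs.length '0')).length =
      cs.length := by
    rw [foldSet_length, List.length_replicate]
  apply List.ext_getElem?
  intro i
  rw [foldSet_getElem _ hnn2 _ i, foldSet_getElem _ hnn1 _ i, hlen1]
  by_cases hi : i < cs.length
  · have hgl : i < (gSpec cs ((cs.length : Int) - O) O).length := by
      rw [gSpec_length]; exact hi
    rw [List.getElem?_eq_getElem hgl, gSpec_getElem cs _ _ i hi hgl,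
      List.getElem?_eq_getElem (by simpa using hi)]
    simp only [mem_take_posList, List.getElem_replicate]
    by_cases hc1 : cs[i] = '1'
    · have hmax : ((cs.take i).countP (fun c => c == '1') <
          (max ((cs.length : Int) - O) 0).toNat) ↔
          (((cs.take i).countP (fun c => c == '1') : Int) < (cs.length : Int) - O) := by
        omega
      by_cases hcnt : ((cs.take i).countP (fun c => c == '1') : Int) < (cs.length : Int) - O
        <;> simp [hc1, hi, hmax, hcnt]
    · have hcast : ((cs.take i).countP (fun c => c != '1') < O) ↔
          (((cs.take i).countP (fun c => c != '1') : Int) < (O : Int)) := by omega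
      by_cases hcnt : ((cs.take i).countP (fun c => c != '1') : Int) < (O : Int)
        <;> simp [hc1, hi, hcast, hcnt]
  · rw [if_neg (by rintro ⟨-, h⟩; exact hi (by simpa using h)),
      if_neg (by rintro ⟨-, h⟩; exact hi (by simpa using h))]
    rw [List.getElem?_eq_none (by simpa using not_lt.mp hi),
      List.getElem?_eq_none (by rw [gSpec_length]; exact not_lt.mp hi)]

theorem alt_eq_gSpec (s t : String) :
    maximumXor_alt s t =
      String.ofList (gSpec s.toList ((s.toList.length : Int) - (PySem.Str.count t "1" : Int))
        (PySem.Str.count t "1" : Int)) := by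
  unfold maximumXor_alt
  simp only []
  congr 1
  exact core_eq s.toList (PySem.Str.count t "1")

-- ===== VERDICT (by name: the statement is the Claim_ definition above) =====
theorem maximumXor_spec : Claim_unchanged_maximumXor := by
  unfold Claim_unchanged_maximumXor
  intro s t _ hnD
  unfold maximumXor
  rw [alt_eq_gSpec s t]
  simp only []
  by_cases hO : ((PySem.Str.count t "1" : Nat) : Int) ≤ (s.toList.length : Int)
  · rw [foldA_clean s.toList _ _ [] (by positivity) (by omega) (by omega)]
    rw [List.nil_append]
  · have hmem : '1' ∉ s.toList := by
      intro hmem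
      exact hnD ⟨by have hco := count_one t; omega, hmem⟩
    rw [foldA_dirty s.toList _ _ [] (by omega) (by omega), List.nil_append,
      gSpec_no1 s.toList _ _ hmem (by omega)]

theorem maximumXor_changed : Claim_changed_maximumXor := by
  unfold Claim_changed_maximumXor; decide

theorem maximumXor_tight : Claim_exact_maximumXor := by
  unfold Claim_exact_maximumXor
  intro s t _ hD heq
  obtain ⟨hlen, hmem⟩ := hD
  obtain ⟨i0, hi0, hc0⟩ := List.mem_iff_getElem.mp hmem
  rw [alt_eq_gSpec s t] at heq
  rw [show maximumXor s t = String.ofList (s.toList.foldl maximumXorStep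
      ((PySem.Str.count t "1" : Int),
        ((s.toList.length : Int) - (PySem.Str.count t "1" : Int)), ([] : List Char))).2.2
    from rfl] at heq
  rw [foldA_dirty s.toList _ _ []
    (by have hco := count_one t; omega) (by have hco := count_one t; omega),
    List.nil_append] at heq
  have hlists : List.replicate s.toList.length '1' =
      gSpec s.toList ((s.toList.length : Int) - (PySem.Str.count t "1" : Int))
        (PySem.Str.count t "1" : Int) := by
    have := congrArg String.toList heq
    simpa using this
  have hgl : i0 < (gSpec s.toList ((s.toList.length : Int) - (PySem.Str.count t "1" : Int))
      (PySem.Str.count t "1" : Int)).length := by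
    rw [gSpec_length]; exact hi0
  have h1 : (List.replicate s.toList.length '1')[i0]'(by simpa using hi0) = '1' :=
    List.getElem_replicate _
  have h2 := gSpec_getElem s.toList ((s.toList.length : Int) - (PySem.Str.count t "1" : Int))
      (PySem.Str.count t "1" : Int) i0 hi0 hgl
  rw [hc0] at h2
  simp only [beq_self_eq_true, if_pos] at h2
  rw [if_neg (by have hco := count_one t; omega)] at h2
  have : (List.replicate s.toList.length '1')[i0]'(by simpa using hi0) =
      (gSpec s.toList ((s.toList.length : Int) - (PySem.Str.count t "1" : Int))
        (PySem.Str.count t "1" : Int))[i0]'hgl := by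
    congr 1
  rw [h1, h2] at this
  exact absurd this (by decide)
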